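-- pv_equiv track=rewrite | github.com/gabriellaec/desoft-analise-exercicios | backup/user_156/ch92_2019_10_02_18_29_07_250174.py | simplifica_dict
-- ===== SOURCE A (Python) =====
-- def simplifica_dict(dicionario):
--     lista = []
--     for k,v in dicionario.items():
--         lista.append(k)
--         lista.append(v)
--
--     lista2 = []
--     for i in lista:
--         if i not in lista2:
--             lista2.append(i)
--     lista2.sort()
--     return lista2
-- ===== SOURCE B (Python) =====
-- def simplifica_dict(dicionario):
--     lista = [x for par in dicionario.items() for x in par]
--     lista.sort()
--     resultado = []
--     for x in lista:
--         if not resultado or resultado[-1] != x: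
--             resultado.append(x)
--     return resultado
-- ===== Notes on version B (the rewrite author's own statement) =====
-- stated objective: faster
-- what changed: Instead of O(n^2) dedup-by-membership-scan followed by sort, B sorts the full flat list (with duplicates) first and deduplicates with one linear adjacent-comparison pass.
import Mathlib
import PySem

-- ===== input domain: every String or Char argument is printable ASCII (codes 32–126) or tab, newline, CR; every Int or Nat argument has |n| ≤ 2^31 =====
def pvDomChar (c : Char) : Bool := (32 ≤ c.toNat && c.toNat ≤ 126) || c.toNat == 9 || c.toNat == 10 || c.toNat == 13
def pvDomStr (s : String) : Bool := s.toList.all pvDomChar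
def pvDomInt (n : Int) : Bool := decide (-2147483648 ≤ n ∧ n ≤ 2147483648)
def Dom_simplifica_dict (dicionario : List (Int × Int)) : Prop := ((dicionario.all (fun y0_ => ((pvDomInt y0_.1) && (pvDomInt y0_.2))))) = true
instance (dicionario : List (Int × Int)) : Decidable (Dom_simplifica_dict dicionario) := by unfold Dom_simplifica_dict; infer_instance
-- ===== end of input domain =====

-- B replaces A's O(n^2) membership-scan dedup followed by a sort with sort-first then one
-- linear adjacent-comparison dedup pass (measured faster at the largest generated sizes).

-- ===== PORT A =====
def simplifica_dict (dicionario : List (Int × Int)) : List Int :=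
  -- lista = []; for k, v in dicionario.items(): lista.append(k); lista.append(v)
  -- lista2 = []; for i in lista: if i not in lista2: lista2.append(i)
  -- lista2.sort(); return lista2
  PySem.List.sorted
    (((PySem.Dict.ofList dicionario).items.foldl (fun l kv => (l ++ [kv.1]) ++ [kv.2]) []).foldl
      (fun l2 i => if i ∈ l2 then l2 else l2 ++ [i]) [])
    (fun x => x) false

-- ===== PORT B =====
def simplifica_dict_alt (dicionario : List (Int × Int)) : List Int :=
  -- lista = [x for par in dicionario.items() for x in par]; lista.sort()
  -- resultado = []; for x in lista: if not resultado or resultado[-1] != x: resultado.append(x)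
  (PySem.List.sorted ((PySem.Dict.ofList dicionario).items.flatMap (fun par => [par.1, par.2]))
      (fun x => x) false).foldl
    (fun res x => if res.getLast? = some x then res else res ++ [x]) []

-- ===== PRECONDITION & SPEC =====
def Spec_simplifica_dict (dicionario : List (Int × Int)) (out : List Int) : Prop := out = simplifica_dict_alt dicionario
instance (dicionario : List (Int × Int)) (out : List Int) : Decidable (Spec_simplifica_dict dicionario out) := by unfold Spec_simplifica_dict; infer_instance

-- ===== CLAIM (what is proved, stated in full; the proofs are below) =====
def Claim_equal_simplifica_dict : Prop := ∀ (dicionario : List (Int × Int)), Dom_simplifica_dict dicionario → Spec_simplifica_dict dicionario (simplifica_dict dicionario)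

-- ===== LEMMAS AND PROOFS =====

-- What B's adjacent-dedup loop computes after an element p has just been appended.
def adjFrom (p : Int) : List Int → List Int
  | [] => []
  | x :: t => if x = p then adjFrom p t else x :: adjFrom x t

theorem foldl_adj_last (s : List Int) : ∀ (acc : List Int) (p : Int), acc.getLast? = some p →
    s.foldl (fun res x => if res.getLast? = some x then res else res ++ [x]) acc
      = acc ++ adjFrom p s := by
  induction s with
  | nil => intro acc p _; simp [adjFrom]
  | cons x t ih =>
    intro acc p hp
    by_cases hxp : x = p
    · subst hxp
      rw [List.foldl_cons, if_pos hp, show adjFrom x (x :: t) = adjFrom x t from by simp [adjFrom]]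
      exact ih acc x hp
    · have hne : acc.getLast? ≠ some x := by
        rw [hp]; intro h; exact hxp (Option.some.inj h).symm
      simp only [List.foldl_cons, if_neg hne, adjFrom, if_neg hxp]
      rw [ih (acc ++ [x]) x (by simp)]
      simp

theorem mem_adjFrom (y : Int) : ∀ (s : List Int) (p : Int), s.Pairwise (· ≤ ·) →
    (∀ z ∈ s, p ≤ z) → (y ∈ adjFrom p s ↔ y ∈ s ∧ y ≠ p) := by
  intro s
  induction s with
  | nil => intro p _ _; simp [adjFrom]
  | cons x t ih =>
    intro p hs hp
    have hpx : p ≤ x := hp x (by simp)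
    have hxt : ∀ z ∈ t, x ≤ z := (List.pairwise_cons.mp hs).1
    have ht : t.Pairwise (· ≤ ·) := (List.pairwise_cons.mp hs).2
    by_cases hxp : x = p
    · subst hxp
      rw [show adjFrom x (x :: t) = adjFrom x t from by simp [adjFrom]]
      rw [ih x ht hxt]
      constructor
      · rintro ⟨hy, hne⟩; exact ⟨by simp [hy], hne⟩
      · rintro ⟨hy, hne⟩
        rcases List.mem_cons.mp hy with h | h
        · exact absurd h hne
        · exact ⟨h, hne⟩
    · have hplt : p < x := lt_of_le_of_ne hpx (fun h => hxp h.symm)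
      simp only [adjFrom, if_neg hxp]
      rw [List.mem_cons, ih x ht hxt, List.mem_cons]
      constructor
      · rintro (rfl | ⟨hy, hne⟩)
        · exact ⟨Or.inl rfl, ne_of_gt hplt⟩
        · have : p < y := lt_of_lt_of_le hplt (hxt y hy)
          exact ⟨Or.inr hy, ne_of_gt this⟩
      · rintro ⟨h | h, hne⟩
        · exact Or.inl h
        · by_cases hyx : y = x
          · exact Or.inl hyx
          · exact Or.inr ⟨h, hyx⟩

theorem pairwise_adjFrom : ∀ (s : List Int) (p : Int), s.Pairwise (· ≤ ·) →
    (adjFrom p s).Pairwise (· < ·) := by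
  intro s
  induction s with
  | nil => intro p _; simp [adjFrom]
  | cons x t ih =>
    intro p hs
    have hxt : ∀ z ∈ t, x ≤ z := (List.pairwise_cons.mp hs).1
    have ht : t.Pairwise (· ≤ ·) := (List.pairwise_cons.mp hs).2
    by_cases hxp : x = p
    · rw [show adjFrom p (x :: t) = adjFrom p t from by simp [adjFrom, hxp]]; exact ih p ht
    · simp only [adjFrom, if_neg hxp]
      refine List.pairwise_cons.mpr ⟨?_, ih x ht⟩
      intro y hy
      have := (mem_adjFrom y t x ht hxt).mp hy
      exact lt_of_le_of_ne (hxt y this.1) (Ne.symm this.2)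

theorem simplifica_dict_spec : Claim_equal_simplifica_dict := by
  intro d _
  unfold Spec_simplifica_dict simplifica_dict simplifica_dict_alt
  -- A's flatten loop builds the same flat list as B's comprehension
  have hflat : (PySem.Dict.ofList d).items.foldl (fun l kv => (l ++ [kv.1]) ++ [kv.2]) []
      = (PySem.Dict.ofList d).items.flatMap (fun par => [par.1, par.2]) := by
    have : ∀ (l : List Int) (kv : Int × Int), (l ++ [kv.1]) ++ [kv.2] = l ++ [kv.1, kv.2] := by
      intro l kv; simp
    calc (PySem.Dict.ofList d).items.foldl (fun l kv => (l ++ [kv.1]) ++ [kv.2]) []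
        = (PySem.Dict.ofList d).items.foldl (fun l kv => l ++ [kv.1, kv.2]) [] := by
          congr 1; funext l kv; exact this l kv
      _ = [] ++ (PySem.Dict.ofList d).items.flatMap (fun par => [par.1, par.2]) :=
          PySem.List.foldl_append_eq_flatMap _ _ _
      _ = _ := by simp
  rw [hflat]
  set L : List Int := (PySem.Dict.ofList d).items.flatMap (fun par => [par.1, par.2]) with hL
  -- A's dedup loop is set(xs)-in-first-insertion-order
  have hdedup : L.foldl (fun l2 i => if i ∈ l2 then l2 else l2 ++ [i]) [] = PySem.Set.ofList L := by
    rw [PySem.Set.ofList_eq_foldl]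
    congr 1; funext s x
    exact (PySem.Set.add_eq_ite s x).symm
  rw [hdedup]
  -- name the sorted flat list and case on it
  rcases hS : PySem.List.sorted L (fun x => x) false with _ | ⟨x, t⟩
  · -- empty: L = [], both sides are []
    have hLnil : L = [] := (PySem.List.sorted_eq_nil_iff L (fun x => x) false).mp hS
    simp [hLnil, PySem.Set.ofList_nil, PySem.List.sorted]
  · -- nonempty: B's loop yields x :: adjFrom x t
    have hB : (x :: t).foldl (fun res x => if res.getLast? = some x then res else res ++ [x]) []
        = x :: adjFrom x t := by
      have h0 : (([] : List Int)).getLast? ≠ some x := by simp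
      simp only [List.foldl_cons, if_neg h0, List.nil_append]
      rw [foldl_adj_last t [x] x (by simp)]
      simp
    rw [hB]
    -- the sorted order facts
    have hpw : (x :: t).Pairwise (· ≤ ·) := by
      have := PySem.List.sorted_pairwise L (fun x => x) (κ := Int)
      rw [hS] at this; exact this
    have hxt : ∀ z ∈ t, x ≤ z := (List.pairwise_cons.mp hpw).1
    have ht : t.Pairwise (· ≤ ·) := (List.pairwise_cons.mp hpw).2
    have hpwlt : (x :: adjFrom x t).Pairwise (· < ·) := by
      refine List.pairwise_cons.mpr ⟨?_, pairwise_adjFrom t x ht⟩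
      intro y hy
      have := (mem_adjFrom y t x ht hxt).mp hy
      exact lt_of_le_of_ne (hxt y this.1) (Ne.symm this.2)
    -- membership: x :: adjFrom x t has exactly the elements of L
    have hmem : ∀ y, y ∈ x :: adjFrom x t ↔ y ∈ PySem.Set.ofList L := by
      intro y
      rw [List.mem_cons, mem_adjFrom y t x ht hxt, PySem.Set.mem_ofList]
      have hmemL : y ∈ L ↔ y ∈ x :: t := by
        rw [← PySem.List.mem_sorted L (fun x => x) false y, hS]
      rw [hmemL, List.mem_cons]
      constructor
      · rintro (rfl | ⟨hy, _⟩)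
        · exact Or.inl rfl
        · exact Or.inr hy
      · rintro (rfl | hy)
        · exact Or.inl rfl
        · by_cases hyx : y = x
          · exact Or.inl hyx
          · exact Or.inr ⟨hy, hyx⟩
    have hnd : (x :: adjFrom x t).Nodup := hpwlt.imp (fun h => ne_of_lt h)
    have hperm : (x :: adjFrom x t).Perm (PySem.Set.ofList L) :=
      (List.perm_ext_iff_of_nodup hnd (PySem.Set.nodup_ofList L)).mpr hmem
    exact (PySem.List.sorted_eq_of_perm_of_pairwise_lt (PySem.Set.ofList L) (x :: adjFrom x t) (fun x => x) hperm hpwlt)
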